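-- pv_equiv track=rewrite | github.com/StarSein/BaekJoon | 백준/Gold/16120. PPAP/PPAP.py | solution
-- ===== SOURCE A (Python) =====
-- def solution(inp: str) -> str:
--     PPAP = ['P', 'P', 'A', 'P']
--     stack = []
--     for c in inp:
--         stack.append(c)
--         if len(stack) >= 4 and all(stack[i] == PPAP[i] for i in range(-4, 0)):
--             del stack[-3:]
--
--     return "PPAP" if stack == ["P"] else "NP"
-- ===== SOURCE B (Python) =====
-- def solution(inp: str) -> str:
--     s = inp
--     while 'PPAP' in s:
--         s = s.replace('PPAP', 'P')
--     return "PPAP" if s == "P" else "NP"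
-- ===== Notes on version B (the rewrite author's own statement) =====
-- stated objective: simpler
-- what changed: Replaced the single-pass character stack with suffix collapsing by fixpoint string rewriting: repeatedly replace every non-overlapping occurrence of the pattern with a single character until the string stabilizes, then compare the normal form (equal by confluence of the rewrite rule); the rewriting passes run in C via str.replace instead of a per-character Python loop.
import Mathlib
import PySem

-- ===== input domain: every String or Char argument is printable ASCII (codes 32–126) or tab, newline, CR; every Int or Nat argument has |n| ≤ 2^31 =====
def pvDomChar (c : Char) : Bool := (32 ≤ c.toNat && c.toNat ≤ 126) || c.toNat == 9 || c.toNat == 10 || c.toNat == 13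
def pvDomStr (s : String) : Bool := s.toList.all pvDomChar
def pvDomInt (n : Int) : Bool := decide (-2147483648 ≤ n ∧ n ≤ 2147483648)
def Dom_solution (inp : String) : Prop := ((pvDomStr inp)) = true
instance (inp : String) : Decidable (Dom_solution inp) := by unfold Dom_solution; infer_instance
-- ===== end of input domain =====

-- B replaces A's one-pass character stack by fixpoint string rewriting (replace 'PPAP'→'P' until
-- stable, then compare with "P"); equally exact, chosen for simplicity, not speed.

-- ===== PORT A =====
-- PPAP = ['P', 'P', 'A', 'P']
def pyPPAP : List Char := ['P', 'P', 'A', 'P']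

-- loop body: stack.append(c); if len(stack) >= 4 and all(stack[i] == PPAP[i] for i in range(-4, 0)): del stack[-3:]
def stepA (stack : List Char) (c : Char) : List Char :=
  let s := stack ++ [c]
  if 4 ≤ s.length ∧
      (PySem.List.pyRange (-4) 0 1).all
        (fun i => PySem.List.pyGet? s i == PySem.List.pyGet? pyPPAP i) then
    PySem.List.slice s none (some (-3))   -- del stack[-3:] keeps stack[:-3]
  else s

def solution (inp : String) : String :=
  if inp.toList.foldl stepA [] = ['P'] then "PPAP" else "NP"

-- ===== PORT B =====
-- B-side termination helpers: s.replace('PPAP','P') is strictly shorter when 'PPAP' occurs in s.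

-- reference recursion for PySem.Chars.replace with old = 'PPAP', new = 'P'
def repl : List Char → List Char
  | [] => []
  | c :: t =>
    if pyPPAP <+: (c :: t) then 'P' :: repl ((c :: t).drop 4) else c :: repl t
termination_by l => l.length
decreasing_by all_goals (simp; try omega)

theorem repl_nil : repl [] = [] := by rw [repl.eq_def]

theorem repl_cons_pos (c : Char) (t : List Char) (hp : pyPPAP <+: (c :: t)) :
    repl (c :: t) = 'P' :: repl ((c :: t).drop 4) := by
  conv_lhs => rw [repl.eq_def]
  simp only [hp, if_true]

theorem repl_cons_neg (c : Char) (t : List Char) (hp : ¬ pyPPAP <+: (c :: t)) :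
    repl (c :: t) = c :: repl t := by
  conv_lhs => rw [repl.eq_def]
  simp only [hp, if_false]

theorem go_eq_repl : ∀ (fuel : Nat) (l acc : List Char), l.length ≤ fuel →
    PySem.Chars.replace.go pyPPAP ['P'] fuel l acc = acc.reverse ++ repl l := by
  intro fuel
  induction fuel with
  | zero =>
    intro l acc h
    have : l = [] := List.eq_nil_of_length_eq_zero (Nat.le_zero.mp h)
    subst this; simp [PySem.Chars.replace.go, repl_nil]
  | succ n ih =>
    intro l acc h
    match l with
    | [] => simp [PySem.Chars.replace.go, repl_nil]
    | c :: t =>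
      rw [PySem.Chars.replace.go]
      by_cases hp : pyPPAP <+: (c :: t)
      · have hb : pyPPAP.isPrefixOf (c :: t) = true := by
          simpa [List.isPrefixOf_iff_prefix] using hp
        rw [if_pos hb]
        have hlen : ((c :: t).drop pyPPAP.length).length ≤ n := by
          simp [pyPPAP] at *; omega
        rw [ih _ _ hlen, repl_cons_pos c t hp]
        simp [pyPPAP]
      · have hb : ¬ pyPPAP.isPrefixOf (c :: t) = true := by
          simpa [List.isPrefixOf_iff_prefix] using hp
        rw [if_neg hb]
        have hlen : t.length ≤ n := by simpa using h
        rw [ih _ _ hlen, repl_cons_neg c t hp]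
        simp

theorem replace_eq_repl (s : List Char) :
    PySem.Chars.replace s pyPPAP ['P'] = repl s := by
  rw [PySem.Chars.replace, if_neg (by simp [pyPPAP])]
  simpa using go_eq_repl s.length s [] le_rfl

theorem repl_length_le (l : List Char) : (repl l).length ≤ l.length := by
  fun_induction repl with
  | case1 => simp
  | case2 c t hp ih =>
    have h4 : 4 ≤ (c :: t).length := hp.length_le
    simp at *; omega
  | case3 c t hp ih => simpa using ih

theorem repl_length_lt (l : List Char) (h : pyPPAP <:+: l) :
    (repl l).length < l.length := by
  fun_induction repl with
  | case1 => simp [pyPPAP] at h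
  | case2 c t hp ih =>
    have h4 : 4 ≤ (c :: t).length := hp.length_le
    have := repl_length_le ((c :: t).drop 4)
    simp at *; omega
  | case3 c t hp ih =>
    rcases (List.infix_cons_iff).mp h with h1 | h2
    · exact absurd h1 hp
    · simpa using ih h2

theorem replace_toList_length_lt (s : String)
    (h : PySem.Str.isIn "PPAP" s = true) :
    (PySem.Str.replace s "PPAP" "P").toList.length < s.toList.length := by
  have hinf : pyPPAP <:+: s.toList := by
    simpa [pyPPAP] using (PySem.Str.isIn_iff_infix "PPAP" s).mp h
  have he : (PySem.Str.replace s "PPAP" "P").toList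
      = PySem.Chars.replace s.toList pyPPAP ['P'] := by
    rw [PySem.Str.toList_replace]; rfl
  rw [he, replace_eq_repl]
  exact repl_length_lt _ hinf

-- while 'PPAP' in s: s = s.replace('PPAP', 'P')
def loopB (s : String) : String :=
  if h : PySem.Str.isIn "PPAP" s = true then loopB (PySem.Str.replace s "PPAP" "P")
  else s
termination_by s.toList.length
decreasing_by exact replace_toList_length_lt s h

def solution_alt (inp : String) : String :=
  let s := loopB inp
  if s = "P" then "PPAP" else "NP"

-- ===== PRECONDITION & SPEC =====
def Spec_solution (inp : String) (out : String) : Prop := out = solution_alt inp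
instance (inp : String) (out : String) : Decidable (Spec_solution inp out) := by unfold Spec_solution; infer_instance

-- ===== CLAIM (what is proved, stated in full; the proofs are below) =====
def Claim_equal_solution : Prop := ∀ (inp : String), Dom_solution inp → Spec_solution inp (solution inp)

-- ===== LEMMAS AND PROOFS =====

-- A's step on REVERSED stacks: push c, collapsing a 'PPAP' suffix (= reversed prefix) to 'P'
def rstep (R : List Char) (c : Char) : List Char :=
  if c = 'P' ∧ R.take 3 = ['A', 'P', 'P'] then 'P' :: R.drop 3 else c :: R

theorem stepA_rev (R : List Char) (c : Char) :
    stepA R.reverse c = (rstep R c).reverse := by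
  match R with
  | [] => simp [stepA, rstep]
  | [a] => simp [stepA, rstep]
  | [a, b] => simp [stepA, rstep]
  | a :: b :: d :: r =>
    have hs : (a :: b :: d :: r).reverse ++ [c] = r.reverse ++ [d, b, a, c] := by simp
    have hlen : (r.reverse ++ [d, b, a, c]).length = r.length + 4 := by simp
    have hrange : PySem.List.pyRange (-4) 0 1 = [-4, -3, -2, -1] := by decide
    have g4 : PySem.List.pyGet? (r.reverse ++ [d, b, a, c]) (-4) = some d := by
      rw [PySem.List.pyGet?_neg_ofNat _ 4 (by omega) (by omega)]
      simp
    have g3 : PySem.List.pyGet? (r.reverse ++ [d, b, a, c]) (-3) = some b := by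
      rw [PySem.List.pyGet?_neg_ofNat _ 3 (by omega) (by omega)]
      simp [hlen, show r.length + 1 - r.length = 1 from by omega]
    have g2 : PySem.List.pyGet? (r.reverse ++ [d, b, a, c]) (-2) = some a := by
      rw [PySem.List.pyGet?_neg_ofNat _ 2 (by omega) (by omega)]
      simp [hlen, show r.length + 2 - r.length = 2 from by omega]
    have g1 : PySem.List.pyGet? (r.reverse ++ [d, b, a, c]) (-1) = some c := by
      rw [PySem.List.pyGet?_neg_ofNat _ 1 (by omega) (by omega)]
      simp [hlen, show r.length + 3 - r.length = 3 from by omega]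
    have hsl : PySem.List.slice (r.reverse ++ [d, b, a, c]) none (some (-3))
        = r.reverse ++ [d] := by
      rw [PySem.List.slice_to_neg_ofNat _ 3 (by omega)]
      rw [hlen, show r.length + 4 - 3 = r.length + 1 from by omega]
      rw [show r.length + 1 = r.reverse.length + 1 by simp]
      simp [List.take_append]
    have p4 : PySem.List.pyGet? pyPPAP (-4) = some 'P' := by decide
    have p3 : PySem.List.pyGet? pyPPAP (-3) = some 'P' := by decide
    have p2 : PySem.List.pyGet? pyPPAP (-2) = some 'A' := by decide
    have p1 : PySem.List.pyGet? pyPPAP (-1) = some 'P' := by decide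
    rw [stepA]
    simp only [hs, hrange, hlen]
    simp only [List.all_cons, List.all_nil, g4, g3, g2, g1, p4, p3, p2, p1]
    by_cases hd : d = 'P' <;> by_cases hb : b = 'P' <;> by_cases ha : a = 'A'
      <;> by_cases hc : c = 'P' <;> (try subst_vars) <;>
      simp_all [rstep, List.take, List.drop]

theorem foldl_stepA_eq (l : List Char) (S : List Char) :
    l.foldl stepA S = (l.foldl rstep S.reverse).reverse := by
  induction l generalizing S with
  | nil => simp
  | cons c t ih =>
    have := stepA_rev S.reverse c
    simp only [List.foldl_cons]
    rw [List.reverse_reverse] at this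
    rw [this, ih, List.reverse_reverse]

-- pushing the four characters P,P,A,P is the same as pushing one P (local confluence of the rule)
theorem foldl_rstep_ppap (R : List Char) :
    List.foldl rstep R ['P', 'P', 'A', 'P'] = rstep R 'P' := by
  by_cases h : R.take 3 = ['A', 'P', 'P']
  · simp [rstep, h, List.foldl]
  · simp [rstep, h, List.foldl]

theorem foldl_rstep_repl (l : List Char) : ∀ R : List Char,
    List.foldl rstep R (repl l) = List.foldl rstep R l := by
  fun_induction repl with
  | case1 => intro R; rfl
  | case2 c t hp ih =>
    intro R
    obtain ⟨u, hu⟩ := hp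
    have hl : c :: t = pyPPAP ++ u := hu.symm
    have hdrop : (c :: t).drop 4 = u := by rw [hl]; simp [pyPPAP]
    rw [hdrop] at ih ⊢
    calc List.foldl rstep R ('P' :: repl u)
        = List.foldl rstep (rstep R 'P') (repl u) := rfl
      _ = List.foldl rstep (rstep R 'P') u := ih _
      _ = List.foldl rstep (List.foldl rstep R ['P', 'P', 'A', 'P']) u := by
            rw [foldl_rstep_ppap]
      _ = List.foldl rstep R (['P', 'P', 'A', 'P'] ++ u) := (List.foldl_append ..).symm
      _ = List.foldl rstep R (c :: t) := by rw [hl]; rfl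
  | case3 c t hp ih =>
    intro R
    simp only [List.foldl_cons]
    exact ih _

-- on a string with no 'PPAP' occurrence the stack never collapses
theorem foldl_rstep_no_infix : ∀ (v R : List Char),
    ¬ pyPPAP <:+: (R.reverse ++ v) → List.foldl rstep R v = v.reverse ++ R := by
  intro v
  induction v with
  | nil => intro R _; simp
  | cons c w ih =>
    intro R hni
    have hstep : rstep R c = c :: R := by
      rw [rstep, if_neg]
      rintro ⟨hc, ht⟩
      apply hni
      have hR : R = 'A' :: 'P' :: 'P' :: R.drop 3 := by
        conv_lhs => rw [← List.take_append_drop 3 R]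
        rw [ht]; rfl
      refine ⟨(R.drop 3).reverse, w, ?_⟩
      rw [hc] at *
      conv_rhs => rw [hR]
      simp [pyPPAP]
    have hni' : ¬ pyPPAP <:+: ((c :: R).reverse ++ w) := by
      simpa using hni
    simp only [List.foldl_cons, hstep]
    rw [ih (c :: R) hni']
    simp

theorem loopB_toList (s : String) :
    (loopB s).toList = (List.foldl rstep [] s.toList).reverse := by
  fun_induction loopB with
  | case1 s h ih =>
    rw [ih]
    have he : (PySem.Str.replace s "PPAP" "P").toList = repl s.toList := by
      rw [PySem.Str.toList_replace, show "PPAP".toList = pyPPAP from rfl,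
        show "P".toList = ['P'] from rfl, replace_eq_repl]
    rw [he, foldl_rstep_repl]
  | case2 s h =>
    have hni : ¬ pyPPAP <:+: s.toList := by
      intro hinf
      exact h ((PySem.Str.isIn_iff_infix "PPAP" s).mpr (by simpa [pyPPAP] using hinf))
    have := foldl_rstep_no_infix s.toList [] (by simpa using hni)
    rw [this]
    simp

theorem string_eq_iff_toList (s t : String) : s = t ↔ s.toList = t.toList := by
  constructor
  · intro h; rw [h]
  · intro h
    have := congrArg String.ofList h
    simpa using this

-- ===== VERDICT (by name: the statement is the Claim_ definition above) =====
theorem solution_spec : Claim_equal_solution := by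
  intro inp _
  unfold Spec_solution solution solution_alt
  rw [foldl_stepA_eq]
  simp only [List.reverse_nil]
  have hB : (loopB inp = "P") ↔ (List.foldl rstep [] inp.toList).reverse = ['P'] := by
    rw [string_eq_iff_toList, loopB_toList]
    constructor <;> intro h <;> simpa using h
  by_cases hA : (List.foldl rstep [] inp.toList).reverse = ['P']
  · rw [if_pos hA, if_pos (hB.mpr hA)]
  · rw [if_neg hA, if_neg (fun h => hA (hB.mp h))]
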